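-- pv_equiv track=rewrite | github.com/999mj/test | 프로그래머스/1/82612. 부족한 금액 계산하기/부족한 금액 계산하기.py | solution
-- ===== SOURCE A (Python) =====
-- def solution(price, money, count):
--     answer = 0
--     sum = 0
--     for i in range(1,count+1):
--         sum += price * i
--     if money < sum:
--         answer = sum - money
--     elif money == sum:
--         answer = 0
--
--     return answer
-- ===== SOURCE B (Python) =====
-- def solution(price, money, count):
--     n = max(count, 0)
--     total = price * n * (n + 1) // 2
--     return max(0, total - money)
-- ===== Notes on version B (the rewrite author's own statement) =====
-- stated objective: faster
-- what changed: Replaces the O(count) accumulation loop with the closed-form Gauss sum price*n*(n+1)//2 and expresses the shortage as max(0, total - money).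
import Mathlib
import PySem

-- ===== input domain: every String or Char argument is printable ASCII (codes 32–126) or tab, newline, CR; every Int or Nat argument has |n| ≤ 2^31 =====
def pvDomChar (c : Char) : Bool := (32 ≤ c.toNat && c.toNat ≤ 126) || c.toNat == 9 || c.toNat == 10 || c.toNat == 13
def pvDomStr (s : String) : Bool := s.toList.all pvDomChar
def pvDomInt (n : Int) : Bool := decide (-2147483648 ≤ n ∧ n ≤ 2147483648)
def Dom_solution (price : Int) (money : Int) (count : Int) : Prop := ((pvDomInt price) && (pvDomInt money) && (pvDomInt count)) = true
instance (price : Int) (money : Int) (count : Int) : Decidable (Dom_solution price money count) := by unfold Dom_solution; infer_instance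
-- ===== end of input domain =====

-- B replaces A's O(count) accumulation loop by the closed-form Gauss sum (O(1)).

-- ===== PORT A =====
def solution (price : Int) (money : Int) (count : Int) : Int :=
  let answer : Int := 0
  let sum : Int := (PySem.List.pyRange 1 (count + 1) 1).foldl (fun s i => s + price * i) 0
  if money < sum then sum - money
  else if money == sum then 0
  else answer

-- ===== PORT B =====
def solution_alt (price : Int) (money : Int) (count : Int) : Int :=
  let n : Int := max count 0
  let total : Int := PySem.Int.floordiv (price * n * (n + 1)) 2
  max 0 (total - money)

-- ===== PRECONDITION & SPEC =====
def Spec_solution (price : Int) (money : Int) (count : Int) (out : Int) : Prop := out = solution_alt price money count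
instance (price : Int) (money : Int) (count : Int) (out : Int) : Decidable (Spec_solution price money count out) := by unfold Spec_solution; infer_instance

-- ===== CLAIM (what is proved, stated in full; the proofs are below) =====
def Claim_equal_solution : Prop := ∀ (price : Int) (money : Int) (count : Int), Dom_solution price money count → Spec_solution price money count (solution price money count)

-- ===== LEMMAS AND PROOFS =====

theorem two_mul_loop (price : Int) (m : Nat) :
    2 * (((List.range m).map (fun k : Nat => (1 : Int) + k)).foldl (fun s i => s + price * i) 0)
      = price * m * (m + 1) := by
  induction m with
  | zero => simp
  | succ n ih =>
    rw [List.range_succ, List.map_append, List.foldl_append]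
    simp only [List.map_cons, List.map_nil, List.foldl_cons, List.foldl_nil]
    push_cast
    push_cast at ih
    ring_nf
    ring_nf at ih
    nlinarith [ih]

theorem loop_closed (price : Int) (m : Nat) :
    (((List.range m).map (fun k : Nat => (1 : Int) + k)).foldl (fun s i => s + price * i) 0)
      = price * m * (m + 1) / 2 := by
  have h := two_mul_loop price m
  omega

-- ===== VERDICT (by name: the statement is the Claim_ definition above) =====
theorem solution_spec : Claim_equal_solution := by
  intro price money count _
  unfold Spec_solution solution solution_alt
  dsimp only
  have hn : max count 0 = (count.toNat : Int) := by omega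
  rw [PySem.Int.floordiv_eq_ediv_of_pos (by norm_num), hn]
  rw [PySem.List.pyRange_one]
  have hc : (count + 1 - 1).toNat = count.toNat := by omega
  rw [hc, loop_closed price count.toNat]
  simp only [beq_iff_eq]
  split_ifs <;> omega
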